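-- pv_equiv track=rewrite | github.com/math-ku/compstat | scripts/python_rmd_to_qmd.py | convert_pull_columns
-- ===== SOURCE A (Python) =====
-- def is_left_column(line):
--     return line.strip() in (".pull-left[", ".two-column-left[")
--
-- def is_right_column(line):
--     return line.strip() in (".pull-right[", ".two-column-right[")
--
-- def is_slide_break(line):
--     return line.strip() in ("--", ". . .")
--
-- def collect_block(lines, start):
--     content = []
--     i = start
--     while i < len(lines) and lines[i].strip() != "]":
--         content.append(lines[i])
--         i += 1
--     return content, i + 1 if i < len(lines) else i
--
-- def convert_pull_columns(lines):
--     out = []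
--     i = 0
--     n = len(lines)
--     left_block = None
--     while i < n:
--         if is_left_column(lines[i]):
--             left_content, next_i = collect_block(lines, i + 1)
--             left_block = left_content
--             i = next_i
--             # Skip any slide breaks or blank lines between columns
--             while i < n and (is_slide_break(lines[i]) or lines[i].strip() == ""):
--                 i += 1
--             # If next is right column, handle as pair
--             if i < n and is_right_column(lines[i]):
--                 right_content, next_i = collect_block(lines, i + 1)
--                 out.append(":::: {.columns}\n\n")
--                 out.append('::: {.column width="50%"}\n')
--                 out.extend(left_block)
--                 out.append("\n:::\n")
--                 out.append('\n::: {.column width="50%"}\n')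
--                 out.extend(right_content)
--                 out.append("\n:::\n")
--                 out.append("\n::::\n\n")
--                 left_block = None
--                 i = next_i
--             else:
--                 # No right column follows, flush left as single column
--                 out.append(":::: {.columns}\n\n")
--                 out.append('::: {.column width="50%"}\n')
--                 out.extend(left_block)
--                 out.append("\n:::\n")
--                 out.append('\n::: {.column width="50%"}\n')
--                 out.append("\n:::\n")
--                 out.append("\n::::\n\n")
--                 left_block = None
--         elif is_right_column(lines[i]):
--             right_content, next_i = collect_block(lines, i + 1)
--             out.append(":::: {.columns}\n\n")
--             out.append('::: {.column width="50%"}\n')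
--             out.append("\n:::\n")
--             out.append('\n::: {.column width="50%"}\n')
--             out.extend(right_content)
--             out.append("\n:::\n")
--             out.append("\n::::\n\n")
--             i = next_i
--         else:
--             out.append(lines[i])
--             i += 1
--     # Flush any remaining left block at the end
--     if left_block:
--         out.append(":::: {.columns}\n\n")
--         out.append('::: {.column width="50%"}\n')
--         out.extend(left_block)
--         out.append("\n:::\n")
--         out.append('\n::: {.column width="50%"}\n')
--         out.append("\n:::\n")
--         out.append("\n::::\n\n")
--     return out
-- ===== SOURCE B (Python) =====
-- # Two-pass rewrite: pass 1 tokenizes the lines into plain/left/right/pair tokens,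
-- # pass 2 renders every token with one uniform column wrapper (empty side lists
-- # cover the lone-left and lone-right cases).
--
-- _LEFT = (".pull-left[", ".two-column-left[")
-- _RIGHT = (".pull-right[", ".two-column-right[")
-- _BREAKS = ("--", ". . .", "")
--
--
-- def _block(lines, i):
--     """Content of the block starting at i and the index just past its ']'."""
--     j = i
--     n = len(lines)
--     while j < n and lines[j].strip() != "]":
--         j += 1
--     return lines[i:j], j + 1 if j < n else j
--
--
-- def _tokens(lines):
--     toks = []
--     i, n = 0, len(lines)
--     while i < n:
--         s = lines[i].strip()
--         if s in _LEFT: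
--             left, i = _block(lines, i + 1)
--             while i < n and lines[i].strip() in _BREAKS:
--                 i += 1
--             if i < n and lines[i].strip() in _RIGHT:
--                 right, i = _block(lines, i + 1)
--                 toks.append(("pair", left, right))
--             else:
--                 toks.append(("left", left, None))
--         elif s in _RIGHT:
--             right, i = _block(lines, i + 1)
--             toks.append(("right", None, right))
--         else:
--             toks.append(("plain", lines[i], None))
--             i += 1
--     return toks
--
--
-- def _render(tok):
--     kind, a, b = tok
--     if kind == "plain":
--         return [a]
--     left = a if a is not None else []
--     right = b if b is not None else []
--     return ([":::: {.columns}\n\n", '::: {.column width="50%"}\n']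
--             + left
--             + ["\n:::\n", '\n::: {.column width="50%"}\n']
--             + right
--             + ["\n:::\n", "\n::::\n\n"])
--
--
-- def convert_pull_columns(lines):
--     return [line for tok in _tokens(lines) for line in _render(tok)]
-- ===== Notes on version B (the rewrite author's own statement) =====
-- stated objective: alternative
-- what changed: Replaced the single emit-as-you-go while loop by a two-pass design: a scanner that turns the lines into plain/left/right/pair tokens, then a renderer that maps every column token through one uniform wrapper (empty sides cover the lone-left/lone-right cases), instead of four hand-duplicated emission blocks.
import Mathlib
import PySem

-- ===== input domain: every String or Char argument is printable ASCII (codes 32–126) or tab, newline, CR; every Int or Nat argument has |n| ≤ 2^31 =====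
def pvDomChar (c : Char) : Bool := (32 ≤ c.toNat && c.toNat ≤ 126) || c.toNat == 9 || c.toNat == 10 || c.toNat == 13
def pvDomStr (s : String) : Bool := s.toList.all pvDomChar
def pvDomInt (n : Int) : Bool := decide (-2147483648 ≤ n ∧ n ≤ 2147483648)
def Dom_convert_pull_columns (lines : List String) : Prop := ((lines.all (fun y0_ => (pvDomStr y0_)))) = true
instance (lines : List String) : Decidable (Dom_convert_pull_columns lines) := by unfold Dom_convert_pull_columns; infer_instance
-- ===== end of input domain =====

-- B changes the decomposition (tokenize, then render with one uniform wrapper) — same values, same cost.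

-- ===== PORT A =====
-- A's index loops are ported as the obvious structural recursions over the
-- remaining suffix of `lines` (an index i into `lines` ↔ the suffix lines.drop i;
-- collect_block's `i + 1 if i < len(lines) else i` is the suffix after the "]",
-- and the suffix [] when no "]" is found).

def is_left_column (line : String) : Bool :=
  PySem.Str.strip line == ".pull-left[" || PySem.Str.strip line == ".two-column-left["

def is_right_column (line : String) : Bool :=
  PySem.Str.strip line == ".pull-right[" || PySem.Str.strip line == ".two-column-right["

def is_slide_break (line : String) : Bool :=
  PySem.Str.strip line == "--" || PySem.Str.strip line == ". . ."

def collect_block : List String → List String × List String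
  | [] => ([], [])
  | x :: xs =>
    if PySem.Str.strip x == "]" then ([], xs)
    else
      let r := collect_block xs
      (x :: r.1, r.2)

-- the `while i < n and (is_slide_break(...) or ... == "")` skip loop
def skip_breaks : List String → List String
  | [] => []
  | x :: xs =>
    if is_slide_break x || PySem.Str.strip x == "" then skip_breaks xs else x :: xs

theorem collect_block_len_le (xs : List String) : (collect_block xs).2.length ≤ xs.length := by
  induction xs with
  | nil => simp [collect_block]
  | cons x xs ih =>
    simp only [collect_block]
    split
    · simp
    · simpa using Nat.le_succ_of_le ih

theorem skip_breaks_len_le (xs : List String) : (skip_breaks xs).length ≤ xs.length := by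
  induction xs with
  | nil => simp [skip_breaks]
  | cons x xs ih =>
    simp only [skip_breaks]
    split
    · exact Nat.le_succ_of_le ih
    · simp

def convert_loop (out : List String) (left_block : Option (List String)) :
    List String → List String
  | [] =>
    -- final `if left_block:` flush (falsy for None and for the empty list)
    match left_block with
    | some lb =>
      if lb.isEmpty then out
      else out ++ [":::: {.columns}\n\n", "::: {.column width=\"50%\"}\n"] ++ lb ++
        ["\n:::\n", "\n::: {.column width=\"50%\"}\n", "\n:::\n", "\n::::\n\n"]
    | none => out
  | x :: xs =>
    if is_left_column x then
      let left_content := (collect_block xs).1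
      match h2 : skip_breaks (collect_block xs).2 with
      | y :: ys =>
        if is_right_column y then
          let right_content := (collect_block ys).1
          convert_loop
            (out ++ [":::: {.columns}\n\n", "::: {.column width=\"50%\"}\n"] ++ left_content ++
              ["\n:::\n", "\n::: {.column width=\"50%\"}\n"] ++ right_content ++
              ["\n:::\n", "\n::::\n\n"]) none (collect_block ys).2
        else
          convert_loop
            (out ++ [":::: {.columns}\n\n", "::: {.column width=\"50%\"}\n"] ++ left_content ++
              ["\n:::\n", "\n::: {.column width=\"50%\"}\n", "\n:::\n", "\n::::\n\n"])
            none (y :: ys)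
      | [] =>
        convert_loop
          (out ++ [":::: {.columns}\n\n", "::: {.column width=\"50%\"}\n"] ++ left_content ++
            ["\n:::\n", "\n::: {.column width=\"50%\"}\n", "\n:::\n", "\n::::\n\n"])
          none []
    else if is_right_column x then
      convert_loop
        (out ++ [":::: {.columns}\n\n", "::: {.column width=\"50%\"}\n", "\n:::\n",
          "\n::: {.column width=\"50%\"}\n"] ++ (collect_block xs).1 ++
          ["\n:::\n", "\n::::\n\n"]) none (collect_block xs).2
    else
      convert_loop (out ++ [x]) left_block xs
termination_by rest => rest.length
decreasing_by
  · have h1 := collect_block_len_le xs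
    have h2' := skip_breaks_len_le (collect_block xs).2
    have hy : (y :: ys).length ≤ xs.length := by rw [← h2]; omega
    have h3 := collect_block_len_le ys
    simp at hy ⊢; omega
  · have h1 := collect_block_len_le xs
    have h2' := skip_breaks_len_le (collect_block xs).2
    have hy : (y :: ys).length ≤ xs.length := by rw [← h2]; omega
    simp at hy ⊢; omega
  · simp
  · have h1 := collect_block_len_le xs
    simp; omega
  · simp

def convert_pull_columns (lines : List String) : List String :=
  convert_loop [] none lines

-- ===== PORT B =====
-- token type of Source B's scanner: ("plain", l), ("left", c), ("right", c), ("pair", l, r)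
inductive PullTok where
  | plain : String → PullTok
  | leftT : List String → PullTok
  | rightT : List String → PullTok
  | pairT : List String → List String → PullTok
deriving Repr, DecidableEq

def isLeftMark (s : String) : Bool :=
  [".pull-left[", ".two-column-left["].contains (PySem.Str.strip s)

def isRightMark (s : String) : Bool :=
  [".pull-right[", ".two-column-right["].contains (PySem.Str.strip s)

def isBreakMark (s : String) : Bool :=
  ["--", ". . .", ""].contains (PySem.Str.strip s)

-- Source B's _block: scan for the first "]" line, slice before it, continue after it
def block_alt (rest : List String) : List String × List String :=
  let j := rest.findIdx (fun x => PySem.Str.strip x == "]")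
  (rest.take j, rest.drop (j + 1))

def tokens_alt : List String → List PullTok
  | [] => []
  | x :: xs =>
    if isLeftMark x then
      let l := (block_alt xs).1
      match h2 : (block_alt xs).2.dropWhile isBreakMark with
      | y :: ys =>
        if isRightMark y then
          PullTok.pairT l (block_alt ys).1 :: tokens_alt (block_alt ys).2
        else
          PullTok.leftT l :: tokens_alt (y :: ys)
      | [] => PullTok.leftT l :: tokens_alt []
    else if isRightMark x then
      PullTok.rightT (block_alt xs).1 :: tokens_alt (block_alt xs).2
    else
      PullTok.plain x :: tokens_alt xs
termination_by rest => rest.length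
decreasing_by
  · have h1 : (block_alt xs).2.length ≤ xs.length := by simp [block_alt]
    have h2' := List.length_dropWhile_le (p := isBreakMark) (l := (block_alt xs).2)
    have hy : (y :: ys).length ≤ xs.length := by rw [← h2]; omega
    have h3 : (block_alt ys).2.length ≤ ys.length := by simp [block_alt]
    simp at hy ⊢; omega
  · have h1 : (block_alt xs).2.length ≤ xs.length := by simp [block_alt]
    have h2' := List.length_dropWhile_le (p := isBreakMark) (l := (block_alt xs).2)
    have hy : (y :: ys).length ≤ xs.length := by rw [← h2]; omega
    simp at hy ⊢; omega
  · simp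
  · have h1 : (block_alt xs).2.length ≤ xs.length := by simp [block_alt]
    simp; omega
  · simp

def render_alt (t : PullTok) : List String :=
  match t with
  | .plain s => [s]
  | .leftT l => wrap_alt l []
  | .rightT r => wrap_alt [] r
  | .pairT l r => wrap_alt l r
where wrap_alt (l r : List String) : List String :=
  [":::: {.columns}\n\n", "::: {.column width=\"50%\"}\n"] ++ l ++
  ["\n:::\n", "\n::: {.column width=\"50%\"}\n"] ++ r ++
  ["\n:::\n", "\n::::\n\n"]

def convert_pull_columns_alt (lines : List String) : List String :=
  (tokens_alt lines).flatMap render_alt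

-- ===== PRECONDITION & SPEC =====
def Spec_convert_pull_columns (lines : List String) (out : List String) : Prop := out = convert_pull_columns_alt lines
instance (lines : List String) (out : List String) : Decidable (Spec_convert_pull_columns lines out) := by unfold Spec_convert_pull_columns; infer_instance

-- ===== CLAIM (what is proved, stated in full; the proofs are below) =====
def Claim_equal_convert_pull_columns : Prop := ∀ (lines : List String), Dom_convert_pull_columns lines → Spec_convert_pull_columns lines (convert_pull_columns lines)

-- ===== LEMMAS AND PROOFS =====

theorem isLeftMark_eq (s : String) : is_left_column s = isLeftMark s := by
  simp [is_left_column, isLeftMark, beq_eq_decide]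

theorem isRightMark_eq (s : String) : is_right_column s = isRightMark s := by
  simp [is_right_column, isRightMark, beq_eq_decide]

theorem isBreakMark_eq (s : String) :
    (is_slide_break s || PySem.Str.strip s == "") = isBreakMark s := by
  simp [is_slide_break, isBreakMark, beq_eq_decide, Bool.or_assoc]

theorem collect_block_eq (xs : List String) : collect_block xs = block_alt xs := by
  induction xs with
  | nil => simp [collect_block, block_alt]
  | cons x xs ih =>
    simp only [collect_block, block_alt, List.findIdx_cons]
    by_cases h : PySem.Str.strip x == "]"
    · simp [h]
    · simp only [h, cond_false, ih, block_alt]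
      simp

theorem skip_breaks_eq (xs : List String) : skip_breaks xs = xs.dropWhile isBreakMark := by
  induction xs with
  | nil => simp [skip_breaks]
  | cons x xs ih =>
    simp only [skip_breaks, List.dropWhile_cons, isBreakMark_eq]
    by_cases h : isBreakMark x <;> simp [h, ih]

theorem skipToDrop (xs : List String) :
    skip_breaks (collect_block xs).2 = (block_alt xs).2.dropWhile isBreakMark := by
  rw [collect_block_eq, skip_breaks_eq]

theorem tokens_alt_pair (x y : String) (xs ys : List String) (hl : isLeftMark x = true)
    (h2 : (block_alt xs).2.dropWhile isBreakMark = y :: ys) (hr : isRightMark y = true) :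
    tokens_alt (x :: xs) =
      PullTok.pairT (block_alt xs).1 (block_alt ys).1 :: tokens_alt (block_alt ys).2 := by
  conv_lhs => rw [tokens_alt]
  rw [if_pos hl]
  split
  · rename_i y' ys' heq
    rw [h2] at heq; injection heq with hy hys; subst hy; subst hys
    rw [if_pos hr]
  · rename_i heq; rw [h2] at heq; cases heq

theorem tokens_alt_left_only (x y : String) (xs ys : List String) (hl : isLeftMark x = true)
    (h2 : (block_alt xs).2.dropWhile isBreakMark = y :: ys) (hr : isRightMark y = false) :
    tokens_alt (x :: xs) = PullTok.leftT (block_alt xs).1 :: tokens_alt (y :: ys) := by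
  conv_lhs => rw [tokens_alt]
  rw [if_pos hl]
  split
  · rename_i y' ys' heq
    rw [h2] at heq; injection heq with hy hys; subst hy; subst hys
    rw [if_neg (by simp [hr])]
  · rename_i heq; rw [h2] at heq; cases heq

theorem tokens_alt_left_nil (x : String) (xs : List String) (hl : isLeftMark x = true)
    (h2 : (block_alt xs).2.dropWhile isBreakMark = []) :
    tokens_alt (x :: xs) = PullTok.leftT (block_alt xs).1 :: tokens_alt [] := by
  conv_lhs => rw [tokens_alt]
  rw [if_pos hl]
  split
  · rename_i heq; rw [h2] at heq; cases heq
  · rfl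

theorem tokens_alt_right (x : String) (xs : List String) (hl : isLeftMark x = false)
    (hr : isRightMark x = true) :
    tokens_alt (x :: xs) = PullTok.rightT (block_alt xs).1 :: tokens_alt (block_alt xs).2 := by
  conv_lhs => rw [tokens_alt]
  rw [if_neg (by simp [hl]), if_pos hr]

theorem tokens_alt_plain (x : String) (xs : List String) (hl : isLeftMark x = false)
    (hr : isRightMark x = false) :
    tokens_alt (x :: xs) = PullTok.plain x :: tokens_alt xs := by
  conv_lhs => rw [tokens_alt]
  rw [if_neg (by simp [hl]), if_neg (by simp [hr])]

set_option maxHeartbeats 1000000 in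
theorem convert_loop_eq (out : List String) (lb : Option (List String)) (rest : List String) :
    lb = none → convert_loop out lb rest = out ++ (tokens_alt rest).flatMap render_alt := by
  induction out, lb, rest using convert_loop.induct with
  | case1 out lb _ => intro h; simp at h
  | case2 out lb _ => intro h; simp at h
  | case3 out => intro _; simp [convert_loop, tokens_alt]
  | case4 out left_block x xs hl _lc y ys h2 hr _rc ih =>
    intro _
    have hl' : isLeftMark x = true := isLeftMark_eq x ▸ hl
    have hr' : isRightMark y = true := isRightMark_eq y ▸ hr
    have h2' : (block_alt xs).2.dropWhile isBreakMark = y :: ys := skipToDrop xs ▸ h2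
    rw [convert_loop, if_pos hl]
    split
    · rename_i y' ys' heq
      rw [h2] at heq; injection heq with hy hys; subst hy; subst hys
      rw [if_pos hr, ih rfl, tokens_alt_pair x y xs ys hl' h2' hr']
      simp [_lc, _rc, render_alt, render_alt.wrap_alt, collect_block_eq]
    · rename_i heq; rw [h2] at heq; cases heq
  | case5 out left_block x xs hl _lc y ys h2 hr ih =>
    intro _
    have hl' : isLeftMark x = true := isLeftMark_eq x ▸ hl
    have hr' : isRightMark y = false := by simpa [← isRightMark_eq] using hr
    have h2' : (block_alt xs).2.dropWhile isBreakMark = y :: ys := skipToDrop xs ▸ h2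
    rw [convert_loop, if_pos hl]
    split
    · rename_i y' ys' heq
      rw [h2] at heq; injection heq with hy hys; subst hy; subst hys
      rw [if_neg hr, ih rfl, tokens_alt_left_only x y xs ys hl' h2' hr']
      simp [_lc, render_alt, render_alt.wrap_alt, collect_block_eq]
    · rename_i heq; rw [h2] at heq; cases heq
  | case6 out left_block x xs hl _lc h2 ih =>
    intro _
    have hl' : isLeftMark x = true := isLeftMark_eq x ▸ hl
    have h2' : (block_alt xs).2.dropWhile isBreakMark = [] := skipToDrop xs ▸ h2
    rw [convert_loop, if_pos hl]
    split
    · rename_i y' ys' heq; rw [h2] at heq; cases heq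
    · rw [ih rfl, tokens_alt_left_nil x xs hl' h2']
      simp [_lc, render_alt, render_alt.wrap_alt, collect_block_eq]
  | case7 out left_block x xs hl hr ih =>
    intro _
    have hl' : isLeftMark x = false := by simpa [← isLeftMark_eq] using hl
    have hr' : isRightMark x = true := isRightMark_eq x ▸ hr
    rw [convert_loop, if_neg hl, if_pos hr, ih rfl, tokens_alt_right x xs hl' hr']
    simp [render_alt, render_alt.wrap_alt, collect_block_eq]
  | case8 out left_block x xs hl hr ih =>
    intro hlb
    subst hlb
    have hl' : isLeftMark x = false := by simpa [← isLeftMark_eq] using hl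
    have hr' : isRightMark x = false := by simpa [← isRightMark_eq] using hr
    rw [convert_loop, if_neg hl, if_neg hr, ih rfl, tokens_alt_plain x xs hl' hr']
    simp [render_alt]

-- ===== VERDICT (by name: the statement is the Claim_ definition above) =====
theorem convert_pull_columns_spec : Claim_equal_convert_pull_columns := by
  intro lines _
  unfold Spec_convert_pull_columns convert_pull_columns convert_pull_columns_alt
  simpa using convert_loop_eq [] none lines rfl
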